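-- pv_equiv track=rewrite | github.com/volcengine/verl | atropos/environments/intern_bootcamp/internbootcamp_lib/internbootcamp/bootcamp/farraybeauty/farraybeauty.py | compute_answer
-- ===== SOURCE A (Python) =====
-- from bisect import bisect_right
--
-- MOD = 998244353
--
-- INF = 10**18
--
-- def compute_answer(n, k, original_a):
--     """优化后的计算逻辑，添加了提前终止条件和范围优化"""
--     if k < 2:
--         return 0
--
--     sorted_a = sorted(original_a)
--     max_diff = sorted_a[-1] - sorted_a[0]
--     max_x = max_diff // (k-1) if k > 1 else 0
--
--     # 调整循环范围为实际可能的最小值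
--     M = min(10**5 + 5, max_x + 2) if max_x else 10**5 + 5
--     a = [-INF] + sorted_a
--     ans = 0
--
--     for x in range(1, M + 1):
--         if x * (k-1) > M:
--             break
--
--         # 预处理指针数组
--         l = [0]*(n+1)
--         for i in range(1, n+1):
--             target = a[i] - x
--             l[i] = bisect_right(a, target, 0, i) - 1
--             l[i] = max(l[i], l[i-1])
--
--         # 动态规划部分
--         dp = [[0]*(n+1) for _ in range(k+1)]
--         dp[0][0] = 1
--
--         for i in range(k):
--             prefix = [0]*(n+1)
--             prefix[0] = dp[i][0]
--             for j in range(1, n+1):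
--                 prefix[j] = (prefix[j-1] + dp[i][j]) % MOD
--
--             for j in range(1, n+1):
--                 if l[j] >= 0:
--                     dp[i+1][j] = prefix[l[j]] % MOD
--
--         res = sum(dp[k][j] for j in range(1, n+1)) % MOD
--         ans = (ans + res) % MOD
--
--     return ans
-- ===== SOURCE B (Python) =====
-- from bisect import bisect_right
--
-- MOD = 998244353
-- INF = 10**18
--
-- def _count(a, n, k, x):
--     """Number of k-element chosen-index chains with consecutive sorted gaps >= x (mod MOD);
--     textually the same DP as one iteration of A's x-loop."""
--     l = [0] * (n + 1)
--     for i in range(1, n + 1):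
--         lo = bisect_right(a, a[i] - x, 0, i) - 1
--         l[i] = max(lo, l[i - 1])
--     dp = [0] * (n + 1)
--     dp[0] = 1
--     for _ in range(k):
--         prefix = [0] * (n + 1)
--         prefix[0] = dp[0]
--         for j in range(1, n + 1):
--             prefix[j] = (prefix[j - 1] + dp[j]) % MOD
--         ndp = [0] * (n + 1)
--         for j in range(1, n + 1):
--             if l[j] >= 0:
--                 ndp[j] = prefix[l[j]] % MOD
--         dp = ndp
--     return sum(dp[j] for j in range(1, n + 1)) % MOD
--
-- def compute_answer(n, k, original_a):
--     if k < 2: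
--         return 0
--     sorted_a = sorted(original_a)
--     max_diff = sorted_a[-1] - sorted_a[0]
--     max_x = max_diff // (k - 1)
--     M = min(10**5 + 5, max_x + 2) if max_x else 10**5 + 5
--     X = M // (k - 1)                 # the last x the x-loop of the naive sum reaches
--     if X < 1:
--         return 0
--     a = [-INF] + sorted_a
--     # the DP result is a step function of x: it can only change where x-1 is a pairwise gap;
--     # collect those threshold x-values, evaluate the DP once per segment, weight by length
--     starts = {1}
--     for i in range(1, n + 1):
--         for j in range(1, i):
--             d = a[i] - a[j]
--             if 2 <= d + 1 <= X:
--                 starts.add(d + 1)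
--     ss = sorted(starts)
--     ans = 0
--     for s, nxt in zip(ss, ss[1:] + [X + 1]):
--         ans = (ans + (nxt - s) * _count(a, n, k, s)) % MOD
--     return ans
-- ===== Notes on version B (the rewrite author's own statement) =====
-- stated objective: faster
-- what changed: Instead of running the O(n*k) gap-threshold DP for every x in the whole range, B observes the DP result is a step function of x whose value can only change at x = (pairwise gap)+1, so it evaluates the DP once per distinct threshold segment and weights each result by the segment length.
import Mathlib
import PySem

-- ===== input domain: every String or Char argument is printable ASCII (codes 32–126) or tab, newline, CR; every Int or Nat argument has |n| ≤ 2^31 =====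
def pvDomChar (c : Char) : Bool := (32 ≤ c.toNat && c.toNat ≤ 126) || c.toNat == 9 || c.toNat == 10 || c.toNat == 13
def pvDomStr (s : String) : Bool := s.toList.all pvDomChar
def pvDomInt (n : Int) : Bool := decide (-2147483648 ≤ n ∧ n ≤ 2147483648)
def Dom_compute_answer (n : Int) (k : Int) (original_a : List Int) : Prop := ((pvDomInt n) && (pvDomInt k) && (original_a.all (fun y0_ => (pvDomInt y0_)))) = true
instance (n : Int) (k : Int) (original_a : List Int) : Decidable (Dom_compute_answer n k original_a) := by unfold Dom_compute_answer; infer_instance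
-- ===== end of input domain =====

-- B evaluates A's gap-threshold DP once per distinct-threshold segment (weighted by length)
-- instead of once per x; equal return value proved on Pre_ (where A returns normally).


-- ===== PORT A =====
def pvMOD : Int := 998244353
def pvINF : Int := 1000000000000000000

-- prefix[0] = row[0]; prefix[j] = (prefix[j-1] + row[j]) % MOD
def pvPfxGo (acc : Int) : List Int → List Int
  | [] => []
  | v :: r => PySem.Int.mod (acc + v) pvMOD :: pvPfxGo (PySem.Int.mod (acc + v) pvMOD) r

def pvPfx : List Int → List Int
  | [] => []
  | h :: t => h :: pvPfxGo h t

-- the pointer array: l[0] = 0, l[i] = max(bisect_right(a, a[i]-x, 0, i) - 1, l[i-1])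
def pvLList (a : List Int) (nn : Nat) (x : Int) : List Int :=
  (List.range nn).foldl
    (fun l i0 =>
      l ++ [max ((PySem.List.bisectRight (a.take (i0 + 1)) (PySem.List.pyGetD a (↑(i0 + 1)) 0 - x) : Int) - 1)
               (l.getD i0 0)])
    [0]

-- one dp-row update: ndp[0] = 0; ndp[j] = prefix[l[j]] % MOD if l[j] >= 0 else 0
def pvStep (l : List Int) (nn : Nat) (row : List Int) : List Int :=
  (List.range nn).foldl
    (fun nd j0 =>
      nd ++ [if 0 ≤ l.getD (j0 + 1) 0
             then PySem.Int.mod ((pvPfx row).getD (l.getD (j0 + 1) 0).toNat 0) pvMOD else 0])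
    [0]

-- one x-iteration of A's loop: res = sum(dp[k][1..n]) % MOD (B's _count is the same code)
def pvRes (a : List Int) (nn kk : Nat) (x : Int) : Int :=
  let l := pvLList a nn x
  let last := (List.range kk).foldl (fun row _ => pvStep l nn row) (1 :: List.replicate nn 0)
  PySem.Int.mod ((List.range nn).foldl (fun s j0 => s + last.getD (j0 + 1) 0) 0) pvMOD

-- pyGetD with default 0 replaces sorted_a[-1]/sorted_a[0]/a[i]: exact on Pre_ (nonempty, 0 ≤ n ≤ len);
-- n.toNat/k.toNat are exact on Pre_ (0 ≤ n, 2 ≤ k)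
def compute_answer (n : Int) (k : Int) (original_a : List Int) : Int :=
  if k < 2 then 0
  else
    let sorted_a := PySem.List.sorted original_a (fun v => v) false
    let max_diff := PySem.List.pyGetD sorted_a (-1) 0 - PySem.List.pyGetD sorted_a 0 0
    let max_x := if 1 < k then PySem.Int.floordiv max_diff (k - 1) else 0
    let M := if max_x ≠ 0 then min 100005 (max_x + 2) else 100005
    let a := (-pvINF) :: sorted_a
    ((PySem.List.pyRange 1 (M + 1) 1).foldl
      (fun st x =>
        if st.1 then st
        else if M < x * (k - 1) then (true, st.2)
        else (false, PySem.Int.mod (st.2 + pvRes a n.toNat k.toNat x) pvMOD))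
      ((false : Bool), (0 : Int))).2

-- ===== PORT B =====
-- d = a[i] - a[j]
def pvD (a : List Int) (i0 j0 : Nat) : Int :=
  PySem.List.pyGetD a (↑(i0 + 1)) 0 - PySem.List.pyGetD a (↑(j0 + 1)) 0

-- starts = {1} ∪ {d+1 | d a pairwise gap, 2 <= d+1 <= X}
def pvStartsSet (a : List Int) (nn : Nat) (X : Int) : List Int :=
  (List.range nn).foldl
    (fun s i0 =>
      (List.range i0).foldl
        (fun s j0 =>
          if 2 ≤ pvD a i0 j0 + 1 ∧ pvD a i0 j0 + 1 ≤ X then PySem.Set.add s (pvD a i0 j0 + 1) else s)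
        s)
    (PySem.Set.ofList [1])

def pvStarts (a : List Int) (nn : Nat) (X : Int) : List Int :=
  PySem.List.sorted (pvStartsSet a nn X) (fun v => v) false

def compute_answer_alt (n : Int) (k : Int) (original_a : List Int) : Int :=
  if k < 2 then 0
  else
    let sorted_a := PySem.List.sorted original_a (fun v => v) false
    let max_diff := PySem.List.pyGetD sorted_a (-1) 0 - PySem.List.pyGetD sorted_a 0 0
    let max_x := PySem.Int.floordiv max_diff (k - 1)
    let M := if max_x ≠ 0 then min 100005 (max_x + 2) else 100005
    let X := PySem.Int.floordiv M (k - 1)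
    if X < 1 then 0
    else
      let a := (-pvINF) :: sorted_a
      let ss := pvStarts a n.toNat X
      (ss.zip (ss.drop 1 ++ [X + 1])).foldl
        (fun acc p => PySem.Int.mod (acc + (p.2 - p.1) * pvRes a n.toNat k.toNat p.1) pvMOD) 0

-- ===== PRECONDITION & SPEC =====
-- Pre_ excludes exactly the inputs where A raises: with k >= 2, an empty list (sorted_a[-1]
-- IndexError) and, unless the x-loop breaks on its very first iteration (k-1 > M, last
-- disjunct: then no list/dp indexing happens and A returns 0), n < 0 (dp[0][0] IndexError)
-- or n > len(original_a) (a[i] IndexError).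
def Pre_compute_answer (n : Int) (k : Int) (original_a : List Int) : Prop :=
  k < 2 ∨ (original_a ≠ [] ∧
    ((0 ≤ n ∧ n ≤ (original_a.length : Int)) ∨
      (let sorted_a := PySem.List.sorted original_a (fun v => v) false
       let mx := PySem.Int.floordiv
         (PySem.List.pyGetD sorted_a (-1) 0 - PySem.List.pyGetD sorted_a 0 0) (k - 1)
       (if mx ≠ 0 then min 100005 (mx + 2) else 100005) < k - 1)))
instance (n : Int) (k : Int) (original_a : List Int) : Decidable (Pre_compute_answer n k original_a) := by
  unfold Pre_compute_answer; infer_instance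

def pvWitness_compute_answer : Int × Int × List Int := (3, 2, [1, 2, 5])

def Spec_compute_answer (n : Int) (k : Int) (original_a : List Int) (out : Int) : Prop := out = compute_answer_alt n k original_a
instance (n : Int) (k : Int) (original_a : List Int) (out : Int) : Decidable (Spec_compute_answer n k original_a out) := by unfold Spec_compute_answer; infer_instance

-- ===== CLAIM (what is proved, stated in full; the proofs are below) =====
def Claim_equal_compute_answer : Prop := ∀ (n : Int) (k : Int) (original_a : List Int), Dom_compute_answer n k original_a → Pre_compute_answer n k original_a → Spec_compute_answer n k original_a (compute_answer n k original_a)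

-- ===== LEMMAS AND PROOFS =====

lemma pv_mod_emod (a : Int) : PySem.Int.mod a pvMOD = a % pvMOD :=
  PySem.Int.mod_eq_emod_of_pos (by norm_num [pvMOD])

lemma pv_modsum {α : Type} (g : α → Int) :
    ∀ (L : List α) (v : Int),
      L.foldl (fun s x => PySem.Int.mod (s + g x) pvMOD) (PySem.Int.mod v pvMOD)
        = PySem.Int.mod (v + (L.map g).sum) pvMOD := by
  intro L
  induction L with
  | nil => intro v; simp
  | cons h t ih =>
    intro v
    simp only [List.foldl_cons, List.map_cons, List.sum_cons]
    have h1 : PySem.Int.mod (PySem.Int.mod v pvMOD + g h) pvMOD = PySem.Int.mod (v + g h) pvMOD := by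
      simp only [pv_mod_emod]; exact Int.emod_add_emod v pvMOD (g h)
    rw [h1, ih (v + g h)]
    ring_nf

lemma pv_frozen (Mv kv : Int) (f : Int → Int) :
    ∀ (L : List Int) (v : Int),
      L.foldl (fun st x => if st.1 then st else if Mv < x * (kv - 1) then (true, st.2)
               else (false, PySem.Int.mod (st.2 + f x) pvMOD)) ((true : Bool), v) = (true, v) := by
  intro L
  induction L with
  | nil => intro v; rfl
  | cons h t ih => intro v; simpa using ih v

lemma pv_livefold (Mv kv : Int) (f : Int → Int) :
    ∀ (L : List Int) (v : Int), (∀ x ∈ L, ¬ Mv < x * (kv - 1)) →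
      L.foldl (fun st x => if st.1 then st else if Mv < x * (kv - 1) then (true, st.2)
               else (false, PySem.Int.mod (st.2 + f x) pvMOD)) ((false : Bool), v)
        = (false, L.foldl (fun s x => PySem.Int.mod (s + f x) pvMOD) v) := by
  intro L
  induction L with
  | nil => intro v _; rfl
  | cons h t ih =>
    intro v hL
    simp only [List.foldl_cons]
    rw [if_neg (by simp), if_neg (hL h (List.mem_cons_self))]
    exact ih _ (fun x hx => hL x (List.mem_cons_of_mem _ hx))

lemma pv_breakfold (Mv kv : Int) (f : Int → Int) :
    ∀ (L : List Int) (v : Int), (∀ x ∈ L, Mv < x * (kv - 1)) →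
      (L.foldl (fun st x => if st.1 then st else if Mv < x * (kv - 1) then (true, st.2)
                else (false, PySem.Int.mod (st.2 + f x) pvMOD)) ((false : Bool), v)).2 = v := by
  intro L v hL
  cases L with
  | nil => rfl
  | cons h t =>
    simp only [List.foldl_cons]
    rw [if_neg (by simp), if_pos (hL h (List.mem_cons_self))]
    rw [pv_frozen Mv kv f t v]

-- A's x-loop with its break is the mod-sum of the per-x results over x = 1 .. M//(k-1)
lemma pv_loopA (Mv kv : Int) (f : Int → Int) (hk : 0 < kv - 1) :
    ((PySem.List.pyRange 1 (Mv + 1) 1).foldl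
      (fun st x => if st.1 then st else if Mv < x * (kv - 1) then (true, st.2)
                   else (false, PySem.Int.mod (st.2 + f x) pvMOD)) ((false : Bool), (0 : Int))).2
      = PySem.Int.mod (((PySem.List.pyRange 1 (PySem.Int.floordiv Mv (kv - 1) + 1) 1).map f).sum) pvMOD := by
  by_cases hM : 0 ≤ Mv
  · set X := PySem.Int.floordiv Mv (kv - 1) with hXdef
    have hXediv : X = Mv / (kv - 1) := PySem.Int.floordiv_eq_ediv_of_pos hk
    have hX0 : 0 ≤ X := by rw [hXediv]; exact Int.ediv_nonneg hM (by omega)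
    have hXM : X ≤ Mv := by rw [hXediv]; exact Int.ediv_le_self _ hM
    rw [PySem.List.pyRange_one_append 1 (X + 1) (Mv + 1) (by omega) (by omega), List.foldl_append]
    rw [pv_livefold Mv kv f _ 0 (by
      intro x hx
      have hmem := (PySem.List.mem_pyRange_one).mp hx
      have hxX : x ≤ X := by omega
      have := (PySem.Int.le_floordiv_iff_mul_le (a := Mv) (b := kv - 1) (q := x) hk).mp (hXdef ▸ hxX)
      omega)]
    rw [pv_breakfold Mv kv f _ _ (by
      intro x hx
      have hmem := (PySem.List.mem_pyRange_one).mp hx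
      have hXx : X < x := by omega
      exact (PySem.Int.floordiv_lt_iff_lt_mul (a := Mv) (b := kv - 1) (q := x) hk).mp (hXdef ▸ hXx))]
    have h0 : (0 : Int) = PySem.Int.mod 0 pvMOD := by rw [pv_mod_emod]; simp
    rw [h0, pv_modsum f _ 0, zero_add]
  · have hMv : Mv < 0 := by omega
    rw [PySem.List.pyRange_one_eq_nil (by omega)]
    have hX : PySem.Int.floordiv Mv (kv - 1) < 1 :=
      (PySem.Int.floordiv_lt_iff_lt_mul hk).mpr (by omega)
    rw [PySem.List.pyRange_one_eq_nil (by omega)]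
    simp [pv_mod_emod]

lemma pv_mem_inner (a : List Int) (X : Int) (i0 : Nat) :
    ∀ (m : Nat) (s0 : List Int) (y : Int),
      (y ∈ (List.range m).foldl
        (fun s j0 => if 2 ≤ pvD a i0 j0 + 1 ∧ pvD a i0 j0 + 1 ≤ X then PySem.Set.add s (pvD a i0 j0 + 1) else s) s0)
      ↔ y ∈ s0 ∨ ∃ j0, j0 < m ∧ (2 ≤ pvD a i0 j0 + 1 ∧ pvD a i0 j0 + 1 ≤ X) ∧ y = pvD a i0 j0 + 1 := by
  intro m
  induction m with
  | zero => intro s0 y; simp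
  | succ m ih =>
    intro s0 y
    rw [List.range_succ, List.foldl_append, List.foldl_cons, List.foldl_nil]
    by_cases hp : 2 ≤ pvD a i0 m + 1 ∧ pvD a i0 m + 1 ≤ X
    · rw [if_pos hp, PySem.Set.mem_add, ih]
      constructor
      · rintro ((h | ⟨j0, hj, hq, hy⟩) | hym)
        · exact Or.inl h
        · exact Or.inr ⟨j0, by omega, hq, hy⟩
        · exact Or.inr ⟨m, by omega, hp, hym⟩
      · rintro (h | ⟨j0, hj, hq, hy⟩)
        · exact Or.inl (Or.inl h)
        · rcases Nat.lt_succ_iff_lt_or_eq.mp hj with h' | h'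
          · exact Or.inl (Or.inr ⟨j0, h', hq, hy⟩)
          · subst h'; exact Or.inr hy
    · rw [if_neg hp, ih]
      constructor
      · rintro (h | ⟨j0, hj, hq, hy⟩)
        · exact Or.inl h
        · exact Or.inr ⟨j0, by omega, hq, hy⟩
      · rintro (h | ⟨j0, hj, hq, hy⟩)
        · exact Or.inl h
        · rcases Nat.lt_succ_iff_lt_or_eq.mp hj with h' | h'
          · exact Or.inr ⟨j0, h', hq, hy⟩
          · subst h'; exact absurd hq hp

lemma pv_mem_starts (a : List Int) (X : Int) :
    ∀ (nn : Nat) (y : Int),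
      (y ∈ pvStartsSet a nn X)
      ↔ y = 1 ∨ ∃ i0 j0, i0 < nn ∧ j0 < i0 ∧ (2 ≤ pvD a i0 j0 + 1 ∧ pvD a i0 j0 + 1 ≤ X) ∧ y = pvD a i0 j0 + 1 := by
  intro nn
  induction nn with
  | zero =>
    intro y
    unfold pvStartsSet
    simp [PySem.Set.ofList]
  | succ m ih =>
    intro y
    unfold pvStartsSet at ih ⊢
    rw [List.range_succ, List.foldl_append, List.foldl_cons, List.foldl_nil]
    rw [pv_mem_inner a X m m _ y, ih y]
    constructor
    · rintro ((h | ⟨i0, j0, hi, hj, hq, hy⟩) | ⟨j0, hj, hq, hy⟩)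
      · exact Or.inl h
      · exact Or.inr ⟨i0, j0, by omega, hj, hq, hy⟩
      · exact Or.inr ⟨m, j0, by omega, hj, hq, hy⟩
    · rintro (h | ⟨i0, j0, hi, hj, hq, hy⟩)
      · exact Or.inl (Or.inl h)
      · rcases Nat.lt_succ_iff_lt_or_eq.mp hi with h' | h'
        · exact Or.inl (Or.inr ⟨i0, j0, h', hj, hq, hy⟩)
        · subst h'; exact Or.inr ⟨j0, hj, hq, hy⟩

lemma pv_nodup_inner (a : List Int) (X : Int) (i0 : Nat) :
    ∀ (m : Nat) (s0 : List Int), s0.Nodup →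
      ((List.range m).foldl
        (fun s j0 => if 2 ≤ pvD a i0 j0 + 1 ∧ pvD a i0 j0 + 1 ≤ X then PySem.Set.add s (pvD a i0 j0 + 1) else s) s0).Nodup := by
  intro m
  induction m with
  | zero => intro s0 h; simpa using h
  | succ m ih =>
    intro s0 h
    rw [List.range_succ, List.foldl_append, List.foldl_cons, List.foldl_nil]
    by_cases hp : 2 ≤ pvD a i0 m + 1 ∧ pvD a i0 m + 1 ≤ X
    · rw [if_pos hp]; exact PySem.Set.nodup_add _ _ (ih s0 h)
    · rw [if_neg hp]; exact ih s0 h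

lemma pv_nodup_starts (a : List Int) (X : Int) (nn : Nat) : (pvStartsSet a nn X).Nodup := by
  induction nn with
  | zero => unfold pvStartsSet; simp [PySem.Set.ofList]
  | succ m ih =>
    unfold pvStartsSet at ih ⊢
    rw [List.range_succ, List.foldl_append, List.foldl_cons, List.foldl_nil]
    exact pv_nodup_inner a X m m _ ih

-- bisect_right is determined by which elements are ≤ the target (on a sorted list)
lemma pv_bisect_congr (xs : List Int) (hs : xs.Pairwise (· ≤ ·)) (t t' : Int)
    (h : ∀ v ∈ xs, v ≤ t ↔ v ≤ t') :
    PySem.List.bisectRight xs t = PySem.List.bisectRight xs t' := by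
  obtain ⟨hl1, hA1, hB1⟩ := PySem.List.bisectRight_spec xs t hs
  obtain ⟨hl2, hA2, hB2⟩ := PySem.List.bisectRight_spec xs t' hs
  rcases Nat.lt_trichotomy (PySem.List.bisectRight xs t) (PySem.List.bisectRight xs t') with hlt | heq | hgt
  · have hr : PySem.List.bisectRight xs t < xs.length := by omega
    have h1 : xs[PySem.List.bisectRight xs t] ≤ t' := hA2 _ hr hlt
    have h2 : t < xs[PySem.List.bisectRight xs t] := hB1 _ hr (le_refl _)
    have h3 : xs[PySem.List.bisectRight xs t] ≤ t := (h _ (List.getElem_mem hr)).mpr h1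
    omega
  · exact heq
  · have hr : PySem.List.bisectRight xs t' < xs.length := by omega
    have h1 : xs[PySem.List.bisectRight xs t'] ≤ t := hA1 _ hr hgt
    have h2 : t' < xs[PySem.List.bisectRight xs t'] := hB2 _ hr (le_refl _)
    have h3 : xs[PySem.List.bisectRight xs t'] ≤ t' := (h _ (List.getElem_mem hr)).mp h1
    omega

lemma pvLList_succ (a : List Int) (m : Nat) (x : Int) :
    pvLList a (m + 1) x
      = pvLList a m x ++ [max ((PySem.List.bisectRight (a.take (m + 1)) (PySem.List.pyGetD a (↑(m + 1)) 0 - x) : Int) - 1)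
                             ((pvLList a m x).getD m 0)] := by
  unfold pvLList
  rw [List.range_succ, List.foldl_append, List.foldl_cons, List.foldl_nil]

lemma pvLList_congr (a : List Int) (x c : Int) :
    ∀ (nn : Nat), (∀ i0, i0 < nn →
        PySem.List.bisectRight (a.take (i0 + 1)) (PySem.List.pyGetD a (↑(i0 + 1)) 0 - x)
          = PySem.List.bisectRight (a.take (i0 + 1)) (PySem.List.pyGetD a (↑(i0 + 1)) 0 - c)) →
      pvLList a nn x = pvLList a nn c := by
  intro nn
  induction nn with
  | zero => intro _; rfl
  | succ m ih =>
    intro h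
    rw [pvLList_succ, pvLList_succ, ih (fun i0 hi => h i0 (by omega)), h m (by omega)]

lemma pvRes_congr (a : List Int) (nn kk : Nat) (x c : Int)
    (h : pvLList a nn x = pvLList a nn c) : pvRes a nn kk x = pvRes a nn kk c := by
  unfold pvRes
  rw [h]

lemma pv_const_sum (f : Int → Int) :
    ∀ (L : List Int) (c : Int), (∀ x ∈ L, f x = c) → (L.map f).sum = (L.length : Int) * c := by
  intro L
  induction L with
  | nil => intro c _; simp
  | cons h t ih =>
    intro c hc
    simp only [List.map_cons, List.sum_cons, List.length_cons]
    rw [ih c (fun x hx => hc x (List.mem_cons_of_mem _ hx)), hc h (List.mem_cons_self)]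
    push_cast; ring

-- sum of a step function over [s, X] = weighted sum over its constancy segments
lemma pv_seg_sum (f : Int → Int) (X : Int) (full : List Int)
    (Hconst : ∀ c x, c ≤ x → x ≤ X → 1 ≤ c → (∀ y ∈ full, ¬ (c < y ∧ y ≤ x)) → f x = f c) :
    ∀ (t : List Int) (s : Int), 1 ≤ s → s ≤ X → t.Pairwise (· < ·) →
      (∀ y ∈ t, s < y ∧ y ≤ X) → (∀ y ∈ full, s < y → y ∈ t) →
      ((PySem.List.pyRange s (X + 1) 1).map f).sum
        = (((s :: t).zip (t ++ [X + 1])).map (fun p => (p.2 - p.1) * f p.1)).sum := by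
  intro t
  induction t with
  | nil =>
    intro s hs1 hsX _ _ hcov
    have hconstL : ∀ x ∈ PySem.List.pyRange s (X + 1) 1, f x = f s := by
      intro x hx
      have hmem := (PySem.List.mem_pyRange_one).mp hx
      exact Hconst s x (by omega) (by omega) hs1
        (fun y hy hxy => by simpa using hcov y hy hxy.1)
    rw [pv_const_sum f _ (f s) hconstL, PySem.List.length_pyRange_one]
    have hcast : (((X + 1 - s).toNat : Nat) : Int) = X + 1 - s := Int.toNat_of_nonneg (by omega)
    simp only [List.nil_append, List.zip_cons_cons, List.zip_nil_right, List.map_cons,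
      List.map_nil, List.sum_cons, List.sum_nil, hcast]
    ring
  | cons s' rest ih =>
    intro s hs1 hsX hpw hT hcov
    have hss' : s < s' ∧ s' ≤ X := hT s' (List.mem_cons_self)
    have hpw' := List.pairwise_cons.mp hpw
    rw [PySem.List.pyRange_one_append s s' (X + 1) (by omega) (by omega), List.map_append,
      List.sum_append]
    have h1 : ∀ x ∈ PySem.List.pyRange s s' 1, f x = f s := by
      intro x hx
      have hmem := (PySem.List.mem_pyRange_one).mp hx
      refine Hconst s x (by omega) (by omega) hs1 ?_
      intro y hy hxy
      have hyt : y ∈ s' :: rest := hcov y hy hxy.1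
      rcases List.mem_cons.mp hyt with h' | h'
      · omega
      · have := hpw'.1 y h'; omega
    rw [pv_const_sum f _ (f s) h1, PySem.List.length_pyRange_one]
    have h2 := ih s' (by omega) hss'.2 hpw'.2
      (fun y hy => ⟨hpw'.1 y hy, (hT y (List.mem_cons_of_mem _ hy)).2⟩)
      (fun y hy hlt => by
        have hyt : y ∈ s' :: rest := hcov y hy (by omega)
        rcases List.mem_cons.mp hyt with h' | h'
        · omega
        · exact h')
    rw [h2]
    have hcast : (((s' - s).toNat : Nat) : Int) = s' - s := Int.toNat_of_nonneg (by omega)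
    simp only [List.cons_append, List.zip_cons_cons, List.map_cons, List.sum_cons, hcast]

lemma pv_modsum0 {α : Type} (g : α → Int) (L : List α) :
    L.foldl (fun s x => PySem.Int.mod (s + g x) pvMOD) 0 = PySem.Int.mod ((L.map g).sum) pvMOD := by
  have h0 : (0 : Int) = PySem.Int.mod 0 pvMOD := by rw [pv_mod_emod]; simp
  rw [h0, pv_modsum g L 0, zero_add]

-- ===== VERDICT (by name: the statement is the Claim_ definition above) =====
theorem compute_answer_spec : Claim_equal_compute_answer := by
  intro n k orig hDom hPre
  unfold Spec_compute_answer
  by_cases hk : k < 2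
  · simp [compute_answer, compute_answer_alt, hk]
  · have hk1 : (0 : Int) < k - 1 := by omega
    unfold Pre_compute_answer at hPre
    simp only [] at hPre
    obtain ⟨hnil, hdisj⟩ : orig ≠ [] ∧ _ := by
      rcases hPre with h | h
      · exact absurd h hk
      · exact h
    have hbnd : ∀ v ∈ orig, -2147483648 ≤ v ∧ v ≤ 2147483648 := by
      unfold Dom_compute_answer at hDom
      simp only [pvDomInt, Bool.and_eq_true, List.all_eq_true, decide_eq_true_eq] at hDom
      exact fun v hv => hDom.2 v hv
    simp only [compute_answer, compute_answer_alt]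
    rw [if_neg hk, if_neg hk, if_pos (show (1 : Int) < k by omega)]
    set sorted_a := PySem.List.sorted orig (fun v => v) false with hsorted
    set md := PySem.List.pyGetD sorted_a (-1) 0 - PySem.List.pyGetD sorted_a 0 0 with hmd
    set mx := PySem.Int.floordiv md (k - 1) with hmx
    set M := (if mx ≠ 0 then min 100005 (mx + 2) else 100005 : Int) with hM
    set a := (-pvINF) :: sorted_a with ha
    set nn := n.toNat with hnn
    set kk := k.toNat with hkk
    set X := PySem.Int.floordiv M (k - 1) with hX
    rw [pv_loopA M k (pvRes a nn kk) hk1, ← hX]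
    by_cases hXlt : X < 1
    · rw [if_pos hXlt, PySem.List.pyRange_one_eq_nil (by omega)]
      simp [pv_mod_emod]
    · rw [if_neg hXlt]
      obtain ⟨hn0, hnlen⟩ : 0 ≤ n ∧ n ≤ (orig.length : Int) := by
        rcases hdisj with h | hbrk
        · exact h
        · exfalso
          have h := (PySem.Int.le_floordiv_iff_mul_le (a := M) (b := k - 1) (q := 1) hk1).mp
            (hX ▸ (by omega : (1 : Int) ≤ X))
          omega
      have hM_le : M ≤ 100005 := by
        rw [hM]; split_ifs
        · exact min_le_left _ _
        · exact le_refl _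
      have h1X : (1 : Int) ≤ X := by omega
      have hM1 : (1 : Int) ≤ M := by
        have h := (PySem.Int.le_floordiv_iff_mul_le (a := M) (b := k - 1) (q := 1) hk1).mp (hX ▸ h1X)
        omega
      have hXM : X ≤ M := by
        rw [hX, PySem.Int.floordiv_eq_ediv_of_pos hk1]
        exact Int.ediv_le_self _ (by omega)
      have hXle : X ≤ 100005 := le_trans hXM hM_le
      have hsl : sorted_a.length = orig.length := by rw [hsorted, PySem.List.length_sorted]
      have ha_len : a.length = orig.length + 1 := by rw [ha, List.length_cons, hsl]
      have hnn_len : nn ≤ orig.length := by omega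
      have hmem_sorted : ∀ v ∈ sorted_a, -2147483648 ≤ v ∧ v ≤ 2147483648 := by
        intro v hv
        exact hbnd v ((PySem.List.mem_sorted orig (fun v => v) false v).mp (by rw [← hsorted]; exact hv))
      have hpw_a : a.Pairwise (· ≤ ·) := by
        rw [ha]
        refine List.pairwise_cons.mpr ⟨?_, ?_⟩
        · intro y hy
          have h := (hmem_sorted y hy).1
          have hI : pvINF = 1000000000000000000 := rfl
          omega
        · have h := PySem.List.sorted_pairwise orig (fun v => v)
          rw [hsorted]; exact h
      have hgetDa : ∀ j : Nat, a.getD (j + 1) 0 = sorted_a.getD j 0 := by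
        intro j; rw [ha]; exact List.getD_cons_succ
      have hbnd_aj : ∀ j : Nat, j < nn → -2147483648 ≤ a.getD (j + 1) 0 ∧ a.getD (j + 1) 0 ≤ 2147483648 := by
        intro j hj
        rw [hgetDa j]
        have hjl : j < sorted_a.length := by omega
        rw [List.getD_eq_getElem sorted_a 0 hjl]
        exact hmem_sorted _ (List.getElem_mem hjl)
      -- structure of the starts list
      have hchar : ∀ y : Int, y ∈ pvStarts a nn X ↔ y ∈ pvStartsSet a nn X := by
        intro y; unfold pvStarts; exact PySem.List.mem_sorted _ _ _ y
      have hnodup_ss : (pvStarts a nn X).Nodup :=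
        (PySem.List.sorted_perm (pvStartsSet a nn X) (fun v => v) false).symm.nodup (pv_nodup_starts a X nn)
      have hle_ss : (pvStarts a nn X).Pairwise (· ≤ ·) :=
        PySem.List.sorted_pairwise (pvStartsSet a nn X) (fun v => v)
      have hlt_ss : (pvStarts a nn X).Pairwise (· < ·) :=
        (hle_ss.and hnodup_ss).imp (fun h => lt_of_le_of_ne h.1 h.2)
      have h1set : (1 : Int) ∈ pvStartsSet a nn X := (pv_mem_starts a X nn 1).mpr (Or.inl rfl)
      have h1ss : (1 : Int) ∈ pvStarts a nn X := (hchar 1).mpr h1set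
      obtain ⟨hd, tl, hsscons⟩ := List.exists_cons_of_ne_nil (List.ne_nil_of_mem h1ss)
      have hd1 : hd = 1 := by
        have hle1 : hd ≤ 1 :=
          PySem.List.key_head_sorted_le (pvStartsSet a nn X) (fun v => v)
            (by unfold pvStarts at hsscons; exact hsscons) 1 h1set
        have hmemhd : hd ∈ pvStartsSet a nn X :=
          (hchar hd).mp (by rw [hsscons]; exact List.mem_cons_self)
        rcases (pv_mem_starts a X nn hd).mp hmemhd with h | ⟨i0, j0, _, _, hq, hy⟩
        · exact h
        · omega
      subst hd1
      have hss_elem : ∀ y ∈ pvStarts a nn X, 1 ≤ y ∧ y ≤ X := by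
        intro y hy
        rcases (pv_mem_starts a X nn y).mp ((hchar y).mp hy) with h | ⟨i0, j0, _, _, hq, hy'⟩
        · omega
        · omega
      have htl : ∀ y ∈ tl, 1 < y ∧ y ≤ X := by
        intro y hy
        have h1 := (List.pairwise_cons.mp (hsscons ▸ hlt_ss)).1 y hy
        have h2 := hss_elem y (by rw [hsscons]; exact List.mem_cons_of_mem _ hy)
        exact ⟨h1, h2.2⟩
      have hcov : ∀ y ∈ pvStarts a nn X, 1 < y → y ∈ tl := by
        intro y hy hlt
        rcases List.mem_cons.mp (hsscons ▸ hy) with h | h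
        · omega
        · exact h
      -- pvRes is constant on a segment containing no threshold from starts
      have Hconst : ∀ c x, c ≤ x → x ≤ X → 1 ≤ c →
          (∀ y ∈ pvStarts a nn X, ¬ (c < y ∧ y ≤ x)) →
          pvRes a nn kk x = pvRes a nn kk c := by
        intro c x hcx hxX hc1 hno
        apply pvRes_congr
        apply pvLList_congr
        intro i0 hi0
        have hi0len : i0 + 1 < a.length := by omega
        apply pv_bisect_congr _ (List.Pairwise.sublist (List.take_sublist _ _) hpw_a)
        intro v hv
        obtain ⟨j, hj, hjv⟩ := List.mem_iff_getElem.mp hv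
        have hjlt : j < i0 + 1 := by
          have h := hj; rw [List.length_take] at h; omega
        have hjlen : j < a.length := by omega
        rw [List.getElem_take] at hjv
        have hvj : v = a.getD j 0 := by
          rw [List.getD_eq_getElem a 0 hjlen]; exact hjv.symm
        have hAi : PySem.List.pyGetD a (↑(i0 + 1)) 0 = a.getD (i0 + 1) 0 :=
          PySem.List.pyGetD_natCast a (i0 + 1) 0
        have hAbnd := hbnd_aj i0 hi0
        rw [hAi]
        cases j with
        | zero =>
          have hv0 : v = -pvINF := by rw [hvj, ha]; rfl
          have hI : pvINF = 1000000000000000000 := rfl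
          rw [hv0]
          constructor <;> intro <;> omega
        | succ j' =>
          constructor
          · intro h; omega
          · intro h
            by_contra hcon
            rw [not_le] at hcon
            have hpvd : pvD a i0 j' = a.getD (i0 + 1) 0 - v := by
              unfold pvD
              rw [PySem.List.pyGetD_natCast a (i0 + 1) 0, PySem.List.pyGetD_natCast a (j' + 1) 0,
                ← hvj]
            have hmem : pvD a i0 j' + 1 ∈ pvStartsSet a nn X :=
              (pv_mem_starts a X nn _).mpr
                (Or.inr ⟨i0, j', hi0, by omega, ⟨by omega, by omega⟩, rfl⟩)
            have hssmem : pvD a i0 j' + 1 ∈ pvStarts a nn X := (hchar _).mpr hmem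
            have hcontra := hno _ hssmem
            omega
      have hsum := pv_seg_sum (pvRes a nn kk) X (pvStarts a nn X) Hconst tl 1 (le_refl 1) h1X
        (List.pairwise_cons.mp (hsscons ▸ hlt_ss)).2 htl hcov
      rw [hsscons]
      simp only [List.drop_succ_cons, List.drop_zero]
      rw [pv_modsum0, hsum]
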